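-- pv_equiv track=rewrite | github.com/kritserv/rpg-maker-clone | src/start_project/src/player.py | make_divisible_by
-- ===== SOURCE A (Python) =====
-- def make_divisible_by(tile_size, num) -> int:
-- 	if num > 0:
-- 		while num % tile_size != 0:
-- 			num += 1
-- 	elif num < 0:
-- 		while num % tile_size != 0:
-- 			num -= 1
-- 	return num
-- ===== SOURCE B (Python) =====
-- def make_divisible_by(tile_size, num) -> int:
--     t = abs(tile_size)
--     if num > 0:
--         return num + (-num) % t
--     elif num < 0:
--         return num - num % t
--     return 0
-- ===== Notes on version B (the rewrite author's own statement) =====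
-- stated objective: faster
-- what changed: Replaced the O(|tile_size|) step-by-one while loops with a closed-form modular-arithmetic formula (one % per call).
import Mathlib
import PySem

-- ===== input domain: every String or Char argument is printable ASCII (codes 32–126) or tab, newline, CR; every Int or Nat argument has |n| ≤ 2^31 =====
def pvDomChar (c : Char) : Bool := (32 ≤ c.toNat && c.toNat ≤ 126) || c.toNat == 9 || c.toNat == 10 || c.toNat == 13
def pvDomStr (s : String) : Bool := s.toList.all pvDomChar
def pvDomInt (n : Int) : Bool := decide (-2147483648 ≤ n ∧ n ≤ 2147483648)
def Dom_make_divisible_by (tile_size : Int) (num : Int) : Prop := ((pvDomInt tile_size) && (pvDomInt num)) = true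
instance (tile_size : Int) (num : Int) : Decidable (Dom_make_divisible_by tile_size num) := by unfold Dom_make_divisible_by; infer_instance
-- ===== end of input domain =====

-- B replaces A's step-by-one while loops by a closed-form modular formula (faster: asymptotic, O(tile_size) -> O(1)).


-- ===== PORT A =====
-- 'while num % tile_size != 0: num += 1' — fuel-bounded structural recursion; fuel |tile_size|
-- suffices (the loop takes at most |tile_size| - 1 steps when tile_size ≠ 0; tile_size = 0 with
-- num ≠ 0 raises ZeroDivisionError in Python and is excluded by Pre_).
def pvUpLoop (tile_size : Int) : Nat → Int → Int
  | 0, num => num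
  | fuel + 1, num =>
      if PySem.Int.mod num tile_size ≠ 0 then pvUpLoop tile_size fuel (num + 1) else num

-- 'while num % tile_size != 0: num -= 1'
def pvDownLoop (tile_size : Int) : Nat → Int → Int
  | 0, num => num
  | fuel + 1, num =>
      if PySem.Int.mod num tile_size ≠ 0 then pvDownLoop tile_size fuel (num - 1) else num

def make_divisible_by (tile_size : Int) (num : Int) : Int :=
  if num > 0 then pvUpLoop tile_size tile_size.natAbs num
  else if num < 0 then pvDownLoop tile_size tile_size.natAbs num
  else num

-- ===== PORT B =====
def make_divisible_by_alt (tile_size : Int) (num : Int) : Int :=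
  let t : Int := |tile_size|
  if num > 0 then num + PySem.Int.mod (-num) t
  else if num < 0 then num - PySem.Int.mod num t
  else 0

-- ===== PRECONDITION & SPEC =====
-- Pre_ excludes only tile_size = 0 with num ≠ 0, where Python A raises ZeroDivisionError.
def Pre_make_divisible_by (tile_size : Int) (num : Int) : Prop := num ≠ 0 → tile_size ≠ 0
instance (tile_size : Int) (num : Int) : Decidable (Pre_make_divisible_by tile_size num) := by unfold Pre_make_divisible_by; infer_instance
def pvWitness_make_divisible_by : Int × Int := (4, 7)

def Spec_make_divisible_by (tile_size : Int) (num : Int) (out : Int) : Prop := out = make_divisible_by_alt tile_size num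
instance (tile_size : Int) (num : Int) (out : Int) : Decidable (Spec_make_divisible_by tile_size num out) := by unfold Spec_make_divisible_by; infer_instance

-- ===== CLAIM (what is proved, stated in full; the proofs are below) =====
def Claim_equal_make_divisible_by : Prop := ∀ (tile_size : Int) (num : Int), Dom_make_divisible_by tile_size num → Pre_make_divisible_by tile_size num → Spec_make_divisible_by tile_size num (make_divisible_by tile_size num)

-- ===== LEMMAS AND PROOFS =====

-- Stepping x down by one, below a positive remainder, lowers x mod T by one.
lemma pvEmod_sub_one (T x : Int) (hT : 0 < T) (hpos : 0 < x % T) :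
    (x - 1) % T = x % T - 1 := by
  have hdm := Int.ediv_add_emod x T
  have hlt := Int.emod_lt_of_pos x hT
  have hx : x - 1 = (x % T - 1) + T * (x / T) := by omega
  rw [hx, Int.add_mul_emod_self_left]
  exact Int.emod_eq_of_lt (by omega) (by omega)

-- With enough fuel, the increment loop lands exactly on num + ((-num) mod |tile_size|).
lemma pvUpLoop_eq (t : Int) (ht : t ≠ 0) :
    ∀ (fuel : Nat) (n : Int), ((-n) % (t.natAbs : Int)).toNat ≤ fuel →
      pvUpLoop t fuel n = n + (-n) % (t.natAbs : Int) := by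
  have hT : (0:Int) < (t.natAbs : Int) := by positivity
  have hTne : (t.natAbs : Int) ≠ 0 := by omega
  intro fuel
  induction fuel with
  | zero =>
      intro n h
      have h0 : (-n) % (t.natAbs : Int) = 0 := by
        have := Int.emod_nonneg (-n) hTne
        omega
      rw [show pvUpLoop t 0 n = n from rfl, h0]; ring
  | succ fuel ih =>
      intro n h
      by_cases hd : PySem.Int.mod n t = 0
      · have hdvd : (t.natAbs : Int) ∣ (-n) := by
          rw [PySem.Int.mod_eq_zero_iff_dvd] at hd
          exact dvd_neg.mpr ((Int.natAbs_dvd).mpr hd)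
        have h0 : (-n) % (t.natAbs : Int) = 0 := Int.emod_eq_zero_of_dvd hdvd
        have hstop : pvUpLoop t (fuel + 1) n = n := by simp [pvUpLoop, hd]
        rw [hstop, h0]; ring
      · have hpos : 0 < (-n) % (t.natAbs : Int) := by
          have hnn := Int.emod_nonneg (-n) hTne
          rcases lt_or_eq_of_le hnn with h' | h'
          · exact h'
          · exact absurd (by
              rw [PySem.Int.mod_eq_zero_iff_dvd]
              exact (Int.natAbs_dvd).mp (dvd_neg.mp (Int.dvd_of_emod_eq_zero h'.symm))) hd
        have hstep : (-(n + 1)) % (t.natAbs : Int) = (-n) % (t.natAbs : Int) - 1 := by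
          have : -(n + 1) = (-n) - 1 := by ring
          rw [this]
          exact pvEmod_sub_one _ _ hT hpos
        have hone : pvUpLoop t (fuel + 1) n = pvUpLoop t fuel (n + 1) := by
          simp [pvUpLoop, hd]
        rw [hone, ih (n + 1) (by rw [hstep]; omega), hstep]; ring

-- With enough fuel, the decrement loop lands exactly on num - (num mod |tile_size|).
lemma pvDownLoop_eq (t : Int) (ht : t ≠ 0) :
    ∀ (fuel : Nat) (n : Int), (n % (t.natAbs : Int)).toNat ≤ fuel →
      pvDownLoop t fuel n = n - n % (t.natAbs : Int) := by
  have hT : (0:Int) < (t.natAbs : Int) := by positivity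
  have hTne : (t.natAbs : Int) ≠ 0 := by omega
  intro fuel
  induction fuel with
  | zero =>
      intro n h
      have h0 : n % (t.natAbs : Int) = 0 := by
        have := Int.emod_nonneg n hTne
        omega
      rw [show pvDownLoop t 0 n = n from rfl, h0]; ring
  | succ fuel ih =>
      intro n h
      by_cases hd : PySem.Int.mod n t = 0
      · have h0 : n % (t.natAbs : Int) = 0 := by
          rw [PySem.Int.mod_eq_zero_iff_dvd] at hd
          exact Int.emod_eq_zero_of_dvd ((Int.natAbs_dvd).mpr hd)
        have hstop : pvDownLoop t (fuel + 1) n = n := by simp [pvDownLoop, hd]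
        rw [hstop, h0]; ring
      · have hpos : 0 < n % (t.natAbs : Int) := by
          have hnn := Int.emod_nonneg n hTne
          rcases lt_or_eq_of_le hnn with h' | h'
          · exact h'
          · exact absurd (by
              rw [PySem.Int.mod_eq_zero_iff_dvd]
              exact (Int.natAbs_dvd).mp (Int.dvd_of_emod_eq_zero h'.symm)) hd
        have hstep : (n - 1) % (t.natAbs : Int) = n % (t.natAbs : Int) - 1 :=
          pvEmod_sub_one _ _ hT hpos
        have hone : pvDownLoop t (fuel + 1) n = pvDownLoop t fuel (n - 1) := by
          simp [pvDownLoop, hd]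
        rw [hone, ih (n - 1) (by rw [hstep]; omega), hstep]; ring

-- ===== VERDICT (by name: the statement is the Claim_ definition above) =====
theorem make_divisible_by_spec : Claim_equal_make_divisible_by := by
  unfold Claim_equal_make_divisible_by
  intro t n _ hpre
  unfold Spec_make_divisible_by make_divisible_by make_divisible_by_alt
  by_cases hn0 : n = 0
  · simp [hn0]
  · have ht : t ≠ 0 := hpre hn0
    have hT : (0:Int) < (t.natAbs : Int) := by positivity
    have habs : |t| = (t.natAbs : Int) := Int.abs_eq_natAbs t
    rcases lt_trichotomy n 0 with h | h | h
    · have hup : ¬ n > 0 := by omega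
      simp only [habs, hup, if_false, if_pos h]
      rw [pvDownLoop_eq t ht t.natAbs n
        (by have := Int.emod_lt_of_pos n hT; have := Int.emod_nonneg n (by omega); omega)]
      rw [PySem.Int.mod_eq_emod_of_pos hT]
    · exact absurd h hn0
    · simp only [habs, if_pos h]
      rw [pvUpLoop_eq t ht t.natAbs n
        (by have := Int.emod_lt_of_pos (-n) hT; have := Int.emod_nonneg (-n) (by omega); omega)]
      rw [PySem.Int.mod_eq_emod_of_pos hT]
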